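-- pv_equiv track=rewrite | github.com/sm18lr88/OpenAI_TTS_GUI | src/openai_tts_gui/core/text.py | _find_split_offset
-- ===== SOURCE A (Python) =====
-- _WHITESPACE_BOUNDARIES = frozenset({" ", "\t", "\n"})
--
-- _PUNCTUATION_BOUNDARIES = frozenset({".", "?", "!", ";", ":"})
--
-- def _find_split_offset(
--     text: str,
--     current_pos: int,
--     end_pos: int,
-- ) -> int:
--     for index in range(end_pos - 1, current_pos - 1, -1):
--         char = text[index]
--         if char in _WHITESPACE_BOUNDARIES:
--             return index + 1 - current_pos
--         if char in _PUNCTUATION_BOUNDARIES and (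
--             index + 1 == end_pos or text[index + 1].isspace()
--         ):
--             return index + 1 - current_pos
--
--     return -1
-- ===== SOURCE B (Python) =====
-- _WHITESPACE_BOUNDARIES = frozenset({" ", "\t", "\n"})
--
-- _PUNCTUATION_BOUNDARIES = frozenset({".", "?", "!", ";", ":"})
--
-- def _find_split_offset(text, current_pos, end_pos):
--     return max(
--         (
--             index + 1 - current_pos
--             for index in range(current_pos, end_pos)
--             if text[index] in _WHITESPACE_BOUNDARIES
--             or (
--                 text[index] in _PUNCTUATION_BOUNDARIES
--                 and (index + 1 == end_pos or text[index + 1].isspace())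
--             )
--         ),
--         default=-1,
--     )
-- ===== Notes on version B (the rewrite author's own statement) =====
-- stated objective: alternative
-- what changed: Backward scan with early return on the first (highest-index) boundary is replaced by collecting every boundary offset of the window with a forward comprehension and returning max(..., default=-1), correct because offsets grow with the index so the maximum is the highest-index boundary.
-- outside the precondition, e.g. on _find_split_offset(':;', -3, 0): A returns 3, B raises IndexError; on _find_split_offset('a b', -3, 3): A returns 5, B returns 5
import Mathlib
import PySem

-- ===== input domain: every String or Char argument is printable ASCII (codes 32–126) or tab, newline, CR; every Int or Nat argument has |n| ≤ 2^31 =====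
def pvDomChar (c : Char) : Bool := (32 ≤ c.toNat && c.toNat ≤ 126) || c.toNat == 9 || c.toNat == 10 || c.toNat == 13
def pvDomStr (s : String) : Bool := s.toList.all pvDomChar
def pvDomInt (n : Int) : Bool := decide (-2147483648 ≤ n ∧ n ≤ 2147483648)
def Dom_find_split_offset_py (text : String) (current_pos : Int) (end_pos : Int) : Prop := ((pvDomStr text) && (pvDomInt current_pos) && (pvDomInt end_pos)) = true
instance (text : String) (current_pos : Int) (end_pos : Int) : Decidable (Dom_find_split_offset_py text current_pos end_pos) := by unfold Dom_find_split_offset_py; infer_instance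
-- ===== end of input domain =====

-- B replaces A's backward early-return scan by collecting all boundary offsets of the
-- window with a forward comprehension and returning their maximum (default -1):
-- alternative decomposition, same cost; return value only.


-- module constants _WHITESPACE_BOUNDARIES / _PUNCTUATION_BOUNDARIES (shared by A and B)
def pvIsWS (c : Char) : Bool := c == ' ' || c == '\t' || c == '\n'
def pvIsPunct (c : Char) : Bool := c == '.' || c == '?' || c == '!' || c == ';' || c == ':'

-- ===== PORT A =====
-- backward loop over range(end_pos-1, current_pos-1, -1) with early return;
-- pyGet? = none is Python's IndexError (those inputs are excluded by Pre_)
def pvLoopA (cs : List Char) (current_pos end_pos : Int) : List Int → Int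
  | [] => -1
  | i :: rest =>
    match PySem.List.pyGet? cs i with
    | none => -1
    | some ch =>
      if pvIsWS ch then i + 1 - current_pos
      else if pvIsPunct ch &&
          (i + 1 == end_pos ||
            (match PySem.List.pyGet? cs (i + 1) with
             | some ch2 => PySem.Chars.isspace ch2
             | none => false)) then i + 1 - current_pos
      else pvLoopA cs current_pos end_pos rest

def find_split_offset_py (text : String) (current_pos : Int) (end_pos : Int) : Int :=
  pvLoopA text.toList current_pos end_pos (PySem.List.pyRange (end_pos - 1) (current_pos - 1) (-1))

-- ===== PORT B =====
-- the comprehension's filter: text[index] is a boundary character of the window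
-- (pyGet? = none is Python's IndexError, excluded by Pre_)
def pvBoundaryB (cs : List Char) (end_pos i : Int) : Bool :=
  match PySem.List.pyGet? cs i with
  | none => false
  | some ch =>
    pvIsWS ch ||
      (pvIsPunct ch &&
        (i + 1 == end_pos ||
          (match PySem.List.pyGet? cs (i + 1) with
           | some ch2 => PySem.Chars.isspace ch2
           | none => false)))

-- max((index + 1 - current_pos for index in range(current_pos, end_pos) if <boundary>), default=-1)
def find_split_offset_py_alt (text : String) (current_pos : Int) (end_pos : Int) : Int :=
  match (PySem.List.pyRange current_pos end_pos 1).filterMap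
      (fun i => if pvBoundaryB text.toList end_pos i then some (i + 1 - current_pos) else none) with
  | [] => -1
  | h :: t => t.foldl max h

-- ===== PRECONDITION & SPEC =====
-- Pre_ keeps the natural domain of window offsets: either the window is empty, or
-- 0 ≤ current_pos and end_pos ≤ len(text); outside it A either raises IndexError
-- (index past the end of text) or relies on Python's negative-index wraparound,
-- which is outside the natural domain of this function.
def Pre_find_split_offset_py (text : String) (current_pos : Int) (end_pos : Int) : Prop :=
  end_pos ≤ current_pos ∨ (0 ≤ current_pos ∧ end_pos ≤ (text.toList.length : Int))
instance (text : String) (current_pos : Int) (end_pos : Int) : Decidable (Pre_find_split_offset_py text current_pos end_pos) := by unfold Pre_find_split_offset_py; infer_instance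

def pvWitness_find_split_offset_py : String × Int × Int := ("a b.x", 0, 5)

def Spec_find_split_offset_py (text : String) (current_pos : Int) (end_pos : Int) (out : Int) : Prop := out = find_split_offset_py_alt text current_pos end_pos
instance (text : String) (current_pos : Int) (end_pos : Int) (out : Int) : Decidable (Spec_find_split_offset_py text current_pos end_pos out) := by unfold Spec_find_split_offset_py; infer_instance

-- ===== CLAIM (what is proved, stated in full; the proofs are below) =====
def Claim_equal_find_split_offset_py : Prop := ∀ (text : String) (current_pos : Int) (end_pos : Int), Dom_find_split_offset_py text current_pos end_pos → Pre_find_split_offset_py text current_pos end_pos → Spec_find_split_offset_py text current_pos end_pos (find_split_offset_py text current_pos end_pos)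

-- ===== LEMMAS AND PROOFS =====

-- the comprehension's element function, shared by the proofs
def pvF (cs : List Char) (current_pos end_pos : Int) (i : Int) : Option Int :=
  if pvBoundaryB cs end_pos i then some (i + 1 - current_pos) else none

-- A's early-return backward loop is the first hit of its index list
lemma pvLoopA_eq (cs : List Char) (c e : Int) (l : List Int)
    (h : ∀ i ∈ l, (PySem.List.pyGet? cs i).isSome) :
    pvLoopA cs c e l = (l.findSome? (pvF cs c e)).getD (-1) := by
  induction l with
  | nil => rfl
  | cons i rest ih =>
    have hi : (PySem.List.pyGet? cs i).isSome := h i (by simp)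
    obtain ⟨ch, hch⟩ := Option.isSome_iff_exists.mp hi
    simp only [pvLoopA, List.findSome?_cons, pvF, pvBoundaryB, hch]
    by_cases hw : pvIsWS ch = true
    · simp [hw]
    · simp only [Bool.not_eq_true] at hw
      simp only [hw, Bool.false_or]
      by_cases hp : (pvIsPunct ch &&
          (i + 1 == e ||
            (match PySem.List.pyGet? cs (i + 1) with
             | some ch2 => PySem.Chars.isspace ch2
             | none => false))) = true
      · simp [hp]
      · simp only [Bool.not_eq_true] at hp
        simp only [hp]
        exact ih (fun j hj => h j (by simp [hj]))

lemma pvFindSome?_eq_head?_filterMap (f : Int → Option Int) (l : List Int) :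
    l.findSome? f = (l.filterMap f).head? := by
  induction l with
  | nil => rfl
  | cons a t ih =>
    cases h : f a with
    | none => rw [List.findSome?_cons, h, List.filterMap_cons, h]; exact ih
    | some b => rw [List.findSome?_cons, h, List.filterMap_cons, h]; rfl

-- folding max over a ≤-sorted list picks its last element
lemma pvFoldlMax_sorted (t : List Int) (a : Int) (h : t.Pairwise (· ≤ ·))
    (ha : ∀ x ∈ t, a ≤ x) :
    t.foldl max a = (t.getLast?).getD a := by
  induction t generalizing a with
  | nil => rfl
  | cons x t ih =>
    have hx : ∀ y ∈ t, x ≤ y := fun y hy => List.rel_of_pairwise_cons h hy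
    have hax : a ≤ x := ha x (by simp)
    rw [List.foldl_cons,
      ih (max a x) h.of_cons (fun y hy => max_le (le_trans hax (hx y hy)) (hx y hy))]
    cases t with
    | nil => simp; omega
    | cons y t' =>
      simp only [List.getLast?_cons_cons]
      rw [List.getLast?_eq_some_getLast (by simp)]
      simp only [Option.getD_some]

-- B equals the last hit of the forward index list
lemma pvAltB_eq (text : String) (c e : Int) :
    find_split_offset_py_alt text c e =
      (((PySem.List.pyRange c e 1).filterMap (pvF text.toList c e)).getLast?).getD (-1) := by
  unfold find_split_offset_py_alt
  have hsorted : ((PySem.List.pyRange c e 1).filterMap (pvF text.toList c e)).Pairwise (· ≤ ·) := by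
    refine List.Pairwise.filterMap _ ?_ (PySem.List.pairwise_lt_pyRange_one c e)
    intro i j hij b hb b' hb'
    unfold pvF at hb hb'
    split at hb
    · split at hb'
      · simp only [Option.some.injEq] at hb hb'
        omega
      · exact absurd hb' (by simp)
    · exact absurd hb (by simp)
  show (match ((PySem.List.pyRange c e 1).filterMap (pvF text.toList c e)) with
    | [] => (-1 : Int)
    | h :: t => t.foldl max h) = _
  cases hl : (PySem.List.pyRange c e 1).filterMap (pvF text.toList c e) with
  | nil => rfl
  | cons h t =>
    rw [hl] at hsorted
    have hfold := pvFoldlMax_sorted t h hsorted.of_cons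
      (fun x hx => List.rel_of_pairwise_cons hsorted hx)
    cases t with
    | nil => simp [hfold]
    | cons y t' =>
      simp only [List.getLast?_cons_cons, hfold]
      rw [List.getLast?_eq_some_getLast (by simp), Option.getD_some, Option.getD_some]

-- ===== VERDICT (by name: the statement is the Claim_ definition above) =====
theorem find_split_offset_py_spec : Claim_equal_find_split_offset_py := by
  intro text c e _ hpre
  unfold Spec_find_split_offset_py find_split_offset_py
  rw [pvAltB_eq]
  rcases hpre with hle | ⟨hc, he⟩
  · rw [PySem.List.pyRange_neg_one_eq_nil (by omega), PySem.List.pyRange_one_eq_nil hle]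
    rfl
  · have hmem : ∀ i ∈ PySem.List.pyRange c e 1, (PySem.List.pyGet? text.toList i).isSome := by
      intro i hi
      rw [PySem.List.mem_pyRange_one] at hi
      rw [Option.isSome_iff_ne_none]
      intro hnone
      rw [PySem.List.pyGet?_eq_none_iff] at hnone
      exact hnone ⟨by omega, by omega⟩
    rw [PySem.List.pyRange_neg_one_eq_reverse]
    have hbounds : PySem.List.pyRange (c - 1 + 1) (e - 1 + 1) 1 = PySem.List.pyRange c e 1 := by
      norm_num
    rw [hbounds]
    rw [pvLoopA_eq text.toList c e _ (by intro i hi; exact hmem i (List.mem_reverse.mp hi))]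
    rw [pvFindSome?_eq_head?_filterMap, List.filterMap_reverse, List.head?_reverse]
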